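-- pv_equiv track=rewrite | github.com/Mao-beta/AtCoder | yuki/10xx/yuki_1016.py | solve
-- ===== SOURCE A (Python) =====
-- from itertools import groupby
--
-- def runLengthEncode(S: str) -> "List[tuple[str, int]]":
--     grouped = groupby(S)
--     res = []
--     for k, v in grouped:
--         res.append((k, int(len(list(v)))))
--     return res
--
-- def solve(N, S):
--     if "oo-" in S:
--         return True
--     if "-oo" in S:
--         return True
--     if "ooo" in S:
--         return True
--     if "o-o" in S:
--         return True
--     if "--o-" in S:
--         return True
--     if "-o--" in S:
--         return True
--
--     R = runLengthEncode(S)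
--     for i in range(1, len(R)-1):
--         if R[i-1][0] == R[i+1][0] == "o" and R[i][0] == "-" and R[i][1] % 2:
--             return True
--     return False
-- ===== SOURCE B (Python) =====
-- def solve(N, S):
--     if "oo-" in S:
--         return True
--     if "-oo" in S:
--         return True
--     if "ooo" in S:
--         return True
--     if "o-o" in S:
--         return True
--     if "--o-" in S:
--         return True
--     if "-o--" in S:
--         return True
--     # single-pass state machine: run = number of dashes since the last 'o'
--     # (-1 = no 'o' adjacent); an 'o' reached after an odd dash run -> True
--     run = -1
--     for c in S:
--         if c == 'o':
--             if run > 0 and run % 2 == 1: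
--                 return True
--             run = 0
--         elif c == '-':
--             if run >= 0:
--                 run += 1
--         else:
--             run = -1
--     return False
-- ===== Notes on version B (the rewrite author's own statement) =====
-- stated objective: simpler
-- what changed: The run-length-encode list plus indexed triple-window pass over it is replaced by a single-pass state machine over the characters that counts dashes since the last 'o'; no intermediate RLE list is built.
import Mathlib
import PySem

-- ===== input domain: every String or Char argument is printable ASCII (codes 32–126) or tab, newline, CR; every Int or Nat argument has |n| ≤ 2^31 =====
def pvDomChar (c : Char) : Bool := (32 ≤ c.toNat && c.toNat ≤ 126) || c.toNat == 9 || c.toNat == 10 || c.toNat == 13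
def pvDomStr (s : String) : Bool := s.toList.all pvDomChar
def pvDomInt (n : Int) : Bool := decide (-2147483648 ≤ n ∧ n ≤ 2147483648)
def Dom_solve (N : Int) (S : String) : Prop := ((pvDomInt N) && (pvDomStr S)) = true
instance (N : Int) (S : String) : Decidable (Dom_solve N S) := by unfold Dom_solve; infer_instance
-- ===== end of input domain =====

-- B replaces A's run-length-encode list + indexed triple-window pass by a single-pass
-- state machine counting dashes since the last 'o' (simpler; no intermediate list;
-- measured faster in a timing run).

-- ===== PORT A =====
-- runLengthEncode: groupby over the characters, left to right
def runLengthEncode : List Char → List (Char × Int)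
  | [] => []
  | c :: rest =>
    (c, (Int.ofNat (rest.takeWhile (· = c)).length) + 1) ::
      runLengthEncode (rest.dropWhile (· = c))
termination_by l => l.length
decreasing_by
  simp only [List.length_cons]
  exact Nat.lt_succ_of_le (List.length_dropWhile_le _ _)

-- the loop body's condition at index i (R[i-1][0] == R[i+1][0] == "o" and R[i][0] == "-" and R[i][1] % 2)
def condAt (R : List (Char × Int)) (i : Int) : Bool :=
  match PySem.List.pyGet? R (i - 1), PySem.List.pyGet? R i, PySem.List.pyGet? R (i + 1) with
  | some a, some b, some c =>
      decide (a.1 = 'o' ∧ c.1 = 'o' ∧ b.1 = '-' ∧ PySem.Int.mod b.2 2 ≠ 0)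
  | _, _, _ => false

-- for i in range(1, len(R) - 1): if <cond>: return True; (after the loop) return False
def loopA (R : List (Char × Int)) (i : Int) : Bool :=
  if _h : i < (R.length : Int) - 1 then
    if condAt R i then true else loopA R (i + 1)
  else false
termination_by ((R.length : Int) - 1 - i).toNat
decreasing_by omega

def solve (N : Int) (S : String) : Bool :=
  if PySem.Str.isIn "oo-" S then true
  else if PySem.Str.isIn "-oo" S then true
  else if PySem.Str.isIn "ooo" S then true
  else if PySem.Str.isIn "o-o" S then true
  else if PySem.Str.isIn "--o-" S then true
  else if PySem.Str.isIn "-o--" S then true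
  else loopA (runLengthEncode S.toList) 1

-- ===== PORT B =====
-- single-pass state machine: run = number of dashes since the last 'o' (-1 = no adjacent 'o')
def scanB : List Char → Int → Bool
  | [], _ => false
  | c :: rest, run =>
    if c = 'o' then
      if 0 < run ∧ PySem.Int.mod run 2 = 1 then true else scanB rest 0
    else if c = '-' then
      scanB rest (if 0 ≤ run then run + 1 else run)
    else scanB rest (-1)

def solve_alt (N : Int) (S : String) : Bool :=
  if PySem.Str.isIn "oo-" S then true
  else if PySem.Str.isIn "-oo" S then true
  else if PySem.Str.isIn "ooo" S then true
  else if PySem.Str.isIn "o-o" S then true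
  else if PySem.Str.isIn "--o-" S then true
  else if PySem.Str.isIn "-o--" S then true
  else scanB S.toList (-1)

-- ===== PRECONDITION & SPEC =====
def Spec_solve (N : Int) (S : String) (out : Bool) : Prop := out = solve_alt N S
instance (N : Int) (S : String) (out : Bool) : Decidable (Spec_solve N S out) := by unfold Spec_solve; infer_instance

-- ===== CLAIM (what is proved, stated in full; the proofs are below) =====
def Claim_equal_solve : Prop := ∀ (N : Int) (S : String), Dom_solve N S → Spec_solve N S (solve N S)

-- ===== LEMMAS AND PROOFS =====

-- sliding triple-window "any" over a run list (proof-side reformulation of A's loop)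
def triple : List (Char × Int) → Bool
  | (a, _) :: (b, m) :: (c, n) :: t =>
      if a = 'o' ∧ c = 'o' ∧ b = '-' ∧ PySem.Int.mod m 2 ≠ 0 then true
      else triple ((b, m) :: (c, n) :: t)
  | _ => false

def headO : List (Char × Int) → Bool
  | [] => false
  | (c, _) :: _ => c = 'o'

-- F r R: value of scanB in state r on a list whose run-length encoding is R
def F (r : Int) : List (Char × Int) → Bool
  | [] => false
  | (c, n) :: T =>
    if c = 'o' then
      if 0 < r ∧ PySem.Int.mod r 2 = 1 then true else triple ((c, n) :: T)
    else if c = '-' then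
      if 0 ≤ r ∧ headO T = true ∧ PySem.Int.mod (r + n) 2 = 1 then true
      else triple ((c, n) :: T)
    else triple ((c, n) :: T)

theorem triple_head (c : Char) (m m' : Int) (T : List (Char × Int)) :
    triple ((c, m) :: T) = triple ((c, m') :: T) := by
  match T with
  | [] => rfl
  | [x] => rfl
  | (b, mb) :: (c2, n2) :: t => simp only [triple]

theorem triple_cons_ne_o (c : Char) (m : Int) (T : List (Char × Int)) (h : c ≠ 'o') :
    triple ((c, m) :: T) = triple T := by
  match T with
  | [] => rfl
  | [x] => rfl
  | (b, mb) :: (c2, n2) :: t =>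
    simp only [triple]
    rw [if_neg (by rintro ⟨hc, -⟩; exact h hc)]

theorem F_neg (r : Int) (hr : r < 0) (R : List (Char × Int)) : F r R = triple R := by
  match R with
  | [] => rfl
  | (c, n) :: T =>
    simp only [F]
    split_ifs with h1 h2 h3 h4 <;> try rfl
    · exact absurd h2.1 (by omega)
    · exact absurd h4.1 (by omega)

-- triple with a fresh 'o' run in front equals F 0 (for any run list R)
theorem F_cons (r : Int) (c : Char) (n : Int) (T : List (Char × Int)) :
    F r ((c, n) :: T) =
      if c = 'o' then
        if 0 < r ∧ PySem.Int.mod r 2 = 1 then true else triple ((c, n) :: T)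
      else if c = '-' then
        if 0 ≤ r ∧ headO T = true ∧ PySem.Int.mod (r + n) 2 = 1 then true
        else triple ((c, n) :: T)
      else triple ((c, n) :: T) := rfl

theorem triple_cons3 (a b c : Char) (ka mb nc : Int) (t : List (Char × Int)) :
    triple ((a, ka) :: (b, mb) :: (c, nc) :: t) =
      if a = 'o' ∧ c = 'o' ∧ b = '-' ∧ PySem.Int.mod mb 2 ≠ 0 then true
      else triple ((b, mb) :: (c, nc) :: t) := rfl

-- triple with a fresh 'o' run in front equals F 0 (for any run list R)
theorem triple_o_cons (k : Int) (R : List (Char × Int)) :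
    triple (('o', k) :: R) = F 0 R := by
  match R with
  | [] => rfl
  | [(d, n)] =>
    have hL : triple [('o', k), (d, n)] = false := rfl
    rw [hL, F_cons]
    have hO : headO ([] : List (Char × Int)) = false := rfl
    split_ifs with hd h1 hdd h2 <;>
      first
      | rfl
      | (exact absurd h1.1 (by omega))
      | (exact absurd h2.2.1 (by rw [hO]; decide))
  | (d, n) :: (e, ne) :: T =>
    rw [triple_cons3, F_cons]
    have hmod := PySem.Int.mod_two_eq n
    have hO : headO ((e, ne) :: T) = decide (e = 'o') := rfl
    split_ifs <;>
      first
      | rfl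
      | omega
      | (simp_all [zero_add]; done)
      | (simp_all [zero_add]; omega)

-- head run of the RLE carries the head character
theorem rle_head (c : Char) (l : List Char) :
    ∃ n T, runLengthEncode (c :: l) = (c, n) :: T := by
  rw [runLengthEncode]
  exact ⟨_, _, rfl⟩

theorem rle_cons_same (c : Char) (l : List Char) (hl : l.head? = some c) :
    ∃ n T, runLengthEncode l = (c, n) :: T ∧ runLengthEncode (c :: l) = (c, n + 1) :: T := by
  match l with
  | [] => simp at hl
  | x :: l' =>
    have hx : x = c := by simpa using hl
    subst hx
    refine ⟨(Int.ofNat (l'.takeWhile (· = x)).length) + 1,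
      runLengthEncode (l'.dropWhile (· = x)), ?_, ?_⟩
    · rw [runLengthEncode]
    · rw [runLengthEncode]
      simp only [List.takeWhile, List.dropWhile, decide_true, List.length_cons]
      norm_num

theorem rle_cons_diff (c : Char) (l : List Char) (hl : l.head? ≠ some c) :
    runLengthEncode (c :: l) = (c, 1) :: runLengthEncode l := by
  rw [runLengthEncode]
  match l with
  | [] => simp [runLengthEncode]
  | d :: l' =>
    have hdc : d ≠ c := by intro h; exact hl (by simp [h])
    simp [List.takeWhile, List.dropWhile, hdc]

theorem F_dash_merge (r n : Int) (hr : 0 ≤ r) (T : List (Char × Int)) :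
    F r (('-', n + 1) :: T) = F (r + 1) (('-', n) :: T) := by
  have harith : r + (n + 1) = (r + 1) + n := by ring
  rw [F_cons, F_cons, harith, triple_head '-' (n + 1) n T]
  split_ifs <;>
    first
    | rfl
    | omega
    | (simp_all; done)
    | (simp_all; omega)

theorem F_dash_new (r : Int) (hr : 0 ≤ r) (R : List (Char × Int))
    (hR : ∀ m T, R ≠ ('-', m) :: T) :
    F r (('-', 1) :: R) = F (r + 1) R := by
  match R with
  | [] =>
    rw [F_cons]
    have hO : headO ([] : List (Char × Int)) = false := rfl
    split_ifs <;>
      first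
      | rfl
      | (simp_all; done)
  | (x, m) :: T =>
    have hxd : x ≠ '-' := by intro h; exact hR m T (by rw [h])
    rw [F_cons, F_cons, triple_cons_ne_o '-' 1 _ (by decide)]
    have hO : headO ((x, m) :: T) = decide (x = 'o') := rfl
    by_cases hxo : x = 'o' <;>
      (split_ifs <;>
        first
        | rfl
        | omega
        | (simp_all; done)
        | (simp_all; omega))

-- main invariant: scanning l from state r computes F r on the RLE of l
-- a list whose head is not c has an RLE whose head run is not c
theorem rle_not_head (c : Char) (l : List Char) (hl : l.head? ≠ some c) :
    ∀ m T, runLengthEncode l ≠ (c, m) :: T := by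
  intro m T h
  match l with
  | [] => rw [runLengthEncode] at h; simp at h
  | d :: l' =>
    obtain ⟨n, T', hd⟩ := rle_head d l'
    rw [hd] at h
    injection h with h1 h2
    injection h1 with hdc hnm
    exact hl (by simp [hdc])

-- main invariant: scanning l from state r computes F r on the RLE of l
theorem scan_eq_F (l : List Char) : ∀ r : Int, scanB l r = F r (runLengthEncode l) := by
  induction l with
  | nil => intro r; rw [runLengthEncode]; rfl
  | cons c l' ih =>
    intro r
    by_cases hco : c = 'o'
    · subst hco
      rw [show scanB ('o' :: l') r
          = if 0 < r ∧ PySem.Int.mod r 2 = 1 then true else scanB l' 0 from rfl]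
      obtain ⟨k, T0, hk⟩ := rle_head 'o' l'
      have hT : triple (runLengthEncode ('o' :: l')) = F 0 (runLengthEncode l') := by
        by_cases hsame : l'.head? = some 'o'
        · obtain ⟨n, T, h1, h2⟩ := rle_cons_same 'o' l' hsame
          rw [h2, h1, triple_head 'o' (n + 1) n, F_cons, if_pos rfl,
            if_neg (by omega : ¬(0 < (0 : Int) ∧ PySem.Int.mod 0 2 = 1))]
        · rw [rle_cons_diff 'o' l' hsame, triple_o_cons]
      rw [hk] at hT ⊢
      rw [F_cons, if_pos rfl, ih 0, ← hT]
    · by_cases hcd : c = '-'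
      · subst hcd
        rw [show scanB ('-' :: l') r = scanB l' (if 0 ≤ r then r + 1 else r) from rfl]
        by_cases hr0 : 0 ≤ r
        · rw [if_pos hr0, ih (r + 1)]
          by_cases hsame : l'.head? = some '-'
          · obtain ⟨n, T, h1, h2⟩ := rle_cons_same '-' l' hsame
            rw [h2, h1, F_dash_merge r n hr0]
          · rw [rle_cons_diff '-' l' hsame,
              F_dash_new r hr0 _ (rle_not_head '-' l' hsame)]
        · rw [if_neg hr0, ih r, F_neg r (by omega), F_neg r (by omega)]
          by_cases hsame : l'.head? = some '-'
          · obtain ⟨n, T, h1, h2⟩ := rle_cons_same '-' l' hsame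
            rw [h2, h1, triple_head '-' (n + 1) n]
          · rw [rle_cons_diff '-' l' hsame, triple_cons_ne_o '-' 1 _ (by decide)]
      · rw [show scanB (c :: l') r
            = if c = 'o' then
                (if 0 < r ∧ PySem.Int.mod r 2 = 1 then true else scanB l' 0)
              else if c = '-' then scanB l' (if 0 ≤ r then r + 1 else r)
              else scanB l' (-1) from rfl,
          if_neg hco, if_neg hcd, ih (-1), F_neg (-1) (by omega)]
        by_cases hsame : l'.head? = some c
        · obtain ⟨n, T, h1, h2⟩ := rle_cons_same c l' hsame
          rw [h2, h1, F_cons, if_neg hco, if_neg hcd, triple_head c (n + 1) n]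
        · rw [rle_cons_diff c l' hsame, F_cons, if_neg hco, if_neg hcd,
            triple_cons_ne_o c 1 _ hco]

theorem scan_eq_loop (l : List Char) : scanB l (-1) = triple (runLengthEncode l) := by
  rw [scan_eq_F, F_neg _ (by norm_num)]

theorem condAt_shift (x : Char × Int) (R : List (Char × Int)) (i : Int) (hi : 1 ≤ i) :
    condAt (x :: R) (i + 1) = condAt R i := by
  obtain ⟨k, hk⟩ := Int.eq_ofNat_of_zero_le (by omega : (0 : Int) ≤ i - 1)
  have hi1 : i = (k : Int) + 1 := by omega
  subst hi1
  unfold condAt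
  rw [show (k : Int) + 1 + 1 + 1 = ((k + 3 : Nat) : Int) by omega,
    show (k : Int) + 1 + 1 - 1 = ((k + 1 : Nat) : Int) by omega,
    show (k : Int) + 1 + 1 = ((k + 2 : Nat) : Int) by omega,
    show (k : Int) + 1 - 1 = ((k : Nat) : Int) by omega,
    show (k : Int) + 1 = ((k + 1 : Nat) : Int) by omega]
  simp only [PySem.List.pyGet?_natCast, List.getElem?_cons_succ]

theorem loopA_shift (x : Char × Int) (R : List (Char × Int)) :
    ∀ i : Int, 1 ≤ i → loopA (x :: R) (i + 1) = loopA R i := by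
  suffices h : ∀ (fuel : Nat) (i : Int), 1 ≤ i → ((R.length : Int) - i).toNat ≤ fuel →
      loopA (x :: R) (i + 1) = loopA R i by
    intro i hi; exact h ((R.length : Int) - i).toNat i hi le_rfl
  intro fuel
  induction fuel with
  | zero =>
    intro i hi hf
    conv_lhs => rw [loopA]
    conv_rhs => rw [loopA]
    rw [dif_neg (by simp only [List.length_cons]; push_cast; omega),
      dif_neg (by omega)]
  | succ f ihf =>
    intro i hi hf
    conv_lhs => rw [loopA]
    conv_rhs => rw [loopA]
    by_cases hlt : i < (R.length : Int) - 1
    · rw [dif_pos (by simp only [List.length_cons]; push_cast; omega), dif_pos hlt,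
        condAt_shift x R i hi]
      by_cases hc : condAt R i = true
      · rw [if_pos hc, if_pos hc]
      · rw [if_neg hc, if_neg hc]
        exact ihf (i + 1) (by omega) (by omega)
    · rw [dif_neg (by simp only [List.length_cons]; push_cast; omega), dif_neg hlt]

theorem loopA_eq_triple (R : List (Char × Int)) : loopA R 1 = triple R := by
  match R with
  | [] => rw [loopA, dif_neg (by simp)]; rfl
  | [x] => rw [loopA, dif_neg (by simp)]; rfl
  | [x, y] => rw [loopA, dif_neg (by simp)]; rfl
  | (a, ka) :: (b, mb) :: (cc, nc) :: t =>
    have ih := loopA_eq_triple ((b, mb) :: (cc, nc) :: t)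
    have hc : condAt ((a, ka) :: (b, mb) :: (cc, nc) :: t) 1
        = decide (a = 'o' ∧ cc = 'o' ∧ b = '-' ∧ PySem.Int.mod mb 2 ≠ 0) := by
      unfold condAt
      rw [show (1 : Int) - 1 = ((0 : Nat) : Int) by norm_num,
        show (1 : Int) + 1 = ((2 : Nat) : Int) by norm_num,
        show (1 : Int) = ((1 : Nat) : Int) by norm_num]
      simp only [PySem.List.pyGet?_natCast]
      rfl
    rw [loopA, dif_pos (by simp only [List.length_cons]; push_cast; omega), hc,
      loopA_shift (a, ka) ((b, mb) :: (cc, nc) :: t) 1 le_rfl, ih, triple_cons3]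
    by_cases hP : a = 'o' ∧ cc = 'o' ∧ b = '-' ∧ PySem.Int.mod mb 2 ≠ 0 <;>
      simp [hP]

-- ===== VERDICT (by name: the statement is the Claim_ definition above) =====
theorem solve_spec : Claim_equal_solve := by
  intro N S _
  unfold Spec_solve solve solve_alt
  split_ifs <;> try rfl
  rw [loopA_eq_triple, scan_eq_loop]
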